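-- pv_equiv track=rewrite | github.com/ksaubhri12/ds_algo | practice_450/backtracking/17_partition_array_k_subsets.py | print_k_sub_set
-- ===== SOURCE A (Python) =====
-- def partition_arr(input_arr: [], index, n, k, result_arr: [], path_arr: []):
--     if index >= n:
--         for arr in path_arr:
--             if len(arr) == 0:
--                 return
--         result_temp_arr = []
--         for arr in path_arr:
--             result_temp_arr.append(arr.copy())
--         result_arr.append(result_temp_arr)
--         return
--
--     element = input_arr[index]
--     for i in range(k):
--         arr = path_arr[i]
--         if len(arr) == 0:
--             path_arr[i].append(element)
--             partition_arr(input_arr, index + 1, n, k, result_arr, path_arr)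
--             path_arr[i].pop(-1)
--             break
--         else:
--             path_arr[i].append(element)
--             partition_arr(input_arr, index + 1, n, k, result_arr, path_arr)
--             path_arr[i].pop(-1)
--
-- def print_k_sub_set(input_arr: [], k):
--     input_arr = sorted(input_arr)
--     result_arr = []
--     path_arr = []
--     for i in range(k):
--         path_arr.append([])
--     partition_arr(input_arr, 0, len(input_arr), k, result_arr, path_arr)
--     return result_arr
-- ===== SOURCE B (Python) =====
-- def print_k_sub_set(input_arr: [], k):
--     # Iterative breadth-first construction: fold over the sorted elements,
--     # keeping the list of all viable partial bucket-fillings; each element is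
--     # appended to every bucket up to and including the first empty one, and
--     # states that can no longer fill all k buckets are pruned.
--     arr = sorted(input_arr)
--     states = [[[] for _ in range(k)]]
--     remaining = len(arr)
--     for x in arr:
--         new_states = []
--         for st in states:
--             i = 0
--             while i < len(st):
--                 new_states.append(st[:i] + [st[i] + [x]] + st[i + 1:])
--                 if not st[i]:
--                     break
--                 i += 1
--         remaining -= 1
--         states = [st for st in new_states
--                   if sum(1 for b in st if b) + remaining >= k]
--     return [st for st in states if all(st)]
-- ===== Notes on version B (the rewrite author's own statement) =====
-- stated objective: alternative
-- what changed: Replaces A's depth-first recursion with in-place backtracking over a shared bucket array by an iterative breadth-first fold that expands the list of all partial bucket-fillings element by element and filters the complete ones at the end.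
import Mathlib
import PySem

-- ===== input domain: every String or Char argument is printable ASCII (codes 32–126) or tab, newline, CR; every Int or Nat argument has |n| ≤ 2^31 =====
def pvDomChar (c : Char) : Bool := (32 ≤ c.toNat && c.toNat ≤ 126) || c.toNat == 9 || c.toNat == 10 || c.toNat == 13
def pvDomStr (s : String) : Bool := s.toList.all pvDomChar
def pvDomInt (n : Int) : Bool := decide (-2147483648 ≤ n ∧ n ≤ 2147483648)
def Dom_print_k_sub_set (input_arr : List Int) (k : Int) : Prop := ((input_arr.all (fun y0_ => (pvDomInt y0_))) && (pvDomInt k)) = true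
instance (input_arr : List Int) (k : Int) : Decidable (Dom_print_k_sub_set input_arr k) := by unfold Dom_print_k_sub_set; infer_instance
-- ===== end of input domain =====

-- B replaces A's depth-first recursion with backtracking by an iterative
-- breadth-first fold over the sorted elements that keeps all partial
-- bucket-fillings; same cost, different decomposition (objective: alternative).

-- ===== PORT A =====
-- partition_arr: fuel = remaining depth bound (n - index at every reachable
-- call), used only for termination; the `index >= n` test is A's own.
mutual
def pvPartArr (arr : List Int) (fuel index n : Nat) (buckets : List (List Int)) : List (List (List Int)) :=
  if index ≥ n then
    if buckets.any (fun a => a.length == 0) then [] else [buckets]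
  else
    match fuel with
    | 0 => []  -- unreachable: fuel ≥ n - index at every call
    | f + 1 => pvPartLoop arr f index n [] buckets
  termination_by (fuel, 0)

-- the `for i in range(k)` loop over path_arr, pre = buckets already passed
def pvPartLoop (arr : List Int) (f index n : Nat) (pre rest : List (List Int)) : List (List (List Int)) :=
  match rest with
  | [] => []
  | b :: bs =>
    -- element = input_arr[index]; index < n = len(arr) at every reachable call
    let element := (PySem.List.pyGet? arr (index : Int)).getD 0
    let r := pvPartArr arr f (index + 1) n (pre ++ (b ++ [element]) :: bs)
    if b.length == 0 then r else r ++ pvPartLoop arr f index n (pre ++ [b]) bs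
  termination_by (f, rest.length + 1)
end

def print_k_sub_set (input_arr : List Int) (k : Int) : List (List (List Int)) :=
  let arr := PySem.List.sorted input_arr (fun x => x) false
  let path := (PySem.List.pyRange 0 k 1).foldl (fun acc _ => acc ++ [([] : List Int)]) []
  pvPartArr arr arr.length 0 arr.length path

-- ===== PORT B =====
-- the `while i < len(st)` loop: successors of one state (pre = st[:i])
def pvExpand (x : Int) (pre rest : List (List Int)) : List (List (List Int)) :=
  match rest with
  | [] => []
  | b :: bs =>
    if b.length == 0 then [pre ++ (b ++ [x]) :: bs]
    else (pre ++ (b ++ [x]) :: bs) :: pvExpand x (pre ++ [b]) bs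

-- the `for st in states` loop building new_states
def pvStep (sts : List (List (List Int))) (x : Int) : List (List (List Int)) :=
  sts.flatMap (fun st => pvExpand x [] st)

-- `sum(1 for b in st if b) + remaining >= k`
def pvViable (k : Int) (remaining : Nat) (st : List (List Int)) : Bool :=
  k ≤ (st.countP (fun b => !b.isEmpty) : Int) + remaining

-- one iteration of `for x in arr` (states, remaining)
def pvStepP (k : Int) (p : List (List (List Int)) × Nat) (x : Int) : List (List (List Int)) × Nat :=
  let r := p.2 - 1
  ((pvStep p.1 x).filter (pvViable k r), r)

def print_k_sub_set_alt (input_arr : List Int) (k : Int) : List (List (List Int)) :=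
  let arr := PySem.List.sorted input_arr (fun x => x) false
  let states := (arr.foldl (pvStepP k) ([List.replicate k.toNat []], arr.length)).1
  states.filter (fun st => st.all (fun b => !b.isEmpty))

-- ===== PRECONDITION & SPEC =====
def Spec_print_k_sub_set (input_arr : List Int) (k : Int) (out : List (List (List Int))) : Prop := out = print_k_sub_set_alt input_arr k
instance (input_arr : List Int) (k : Int) (out : List (List (List Int))) : Decidable (Spec_print_k_sub_set input_arr k out) := by unfold Spec_print_k_sub_set; infer_instance

-- ===== CLAIM (what is proved, stated in full; the proofs are below) =====
def Claim_equal_print_k_sub_set : Prop := ∀ (input_arr : List Int) (k : Int), Dom_print_k_sub_set input_arr k → Spec_print_k_sub_set input_arr k (print_k_sub_set input_arr k)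

-- ===== LEMMAS AND PROOFS =====

-- common specification: depth-first generation as a pure recursion over the
-- remaining elements
def pvDfs (buckets : List (List Int)) (l : List Int) : List (List (List Int)) :=
  match l with
  | [] => if buckets.any (fun a => a.length == 0) then [] else [buckets]
  | x :: xs => (pvExpand x [] buckets).flatMap (fun st => pvDfs st xs)

theorem pvPartLoop_eq_flatMap (arr : List Int) (f index n : Nat) :
    ∀ (rest pre : List (List Int)),
      pvPartLoop arr f index n pre rest =
        (pvExpand ((PySem.List.pyGet? arr (index : Int)).getD 0) pre rest).flatMap
          (fun st => pvPartArr arr f (index + 1) n st) := by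
  intro rest
  induction rest with
  | nil => intro pre; simp [pvPartLoop, pvExpand]
  | cons b bs ih =>
    intro pre
    simp only [pvPartLoop, pvExpand]
    by_cases hb : b.length = 0
    · simp [hb]
    · simp [hb, ih]

theorem pvPartArr_eq_pvDfs (arr : List Int) :
    ∀ (fuel index : Nat) (buckets : List (List Int)),
      arr.length ≤ index + fuel →
      pvPartArr arr fuel index arr.length buckets = pvDfs buckets (arr.drop index) := by
  intro fuel
  induction fuel with
  | zero =>
    intro index buckets h
    have hge : index ≥ arr.length := by omega
    rw [List.drop_of_length_le hge]
    simp [pvPartArr, hge, pvDfs]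
  | succ f ih =>
    intro index buckets h
    by_cases hge : index ≥ arr.length
    · rw [List.drop_of_length_le hge]
      simp [pvPartArr, hge, pvDfs]
    · have hlt : index < arr.length := by omega
      have hdrop : arr.drop index = arr[index] :: arr.drop (index + 1) :=
        List.drop_eq_getElem_cons hlt
      have hget : (PySem.List.pyGet? arr (index : Int)).getD 0 = arr[index] := by
        rw [PySem.List.pyGet?_natCast]
        simp [List.getElem?_eq_getElem hlt]
      rw [pvPartArr]
      simp only [hge, if_false]
      rw [pvPartLoop_eq_flatMap, hdrop, pvDfs, hget]
      refine List.flatMap_congr (fun st _ => ?_)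
      exact ih (index + 1) st (by omega)

theorem pvFoldl_step_flatMap :
    ∀ (l : List Int) (sts : List (List (List Int))),
      l.foldl pvStep sts = sts.flatMap (fun st => l.foldl pvStep [st]) := by
  intro l
  induction l with
  | nil => intro sts; simp
  | cons x xs ih =>
    intro sts
    simp only [List.foldl_cons]
    rw [ih (pvStep sts x)]
    have h2 : ∀ st, List.foldl pvStep (pvStep [st] x) xs
        = (pvStep [st] x).flatMap (fun s => List.foldl pvStep [s] xs) := fun st => ih _
    simp only [h2]
    simp [pvStep, List.flatMap_assoc]

theorem pvDfs_eq_foldl (l : List Int) :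
    ∀ (buckets : List (List Int)),
      pvDfs buckets l =
        (l.foldl pvStep [buckets]).filter (fun st => st.all (fun b => !b.isEmpty)) := by
  induction l with
  | nil =>
    intro buckets
    have hlen : ∀ a : List Int, (a.length == 0) = a.isEmpty := fun a => by cases a <;> rfl
    simp only [pvDfs, List.foldl_nil, hlen]
    by_cases h : ∃ a ∈ buckets, a.isEmpty = true
    · have h1 : buckets.any (fun a => a.isEmpty) = true := by
        simpa [List.any_eq_true] using h
      have h2 : (buckets.all fun b => !b.isEmpty) = false := by
        obtain ⟨a, ha, he⟩ := h
        simp only [List.all_eq_false]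
        exact ⟨a, ha, by simp [he]⟩
      simp [h1, h2]
    · have h1 : buckets.any (fun a => a.isEmpty) = false := by
        simp only [List.any_eq_false]
        intro a ha hcon
        exact h ⟨a, ha, hcon⟩
      have h2 : (buckets.all fun b => !b.isEmpty) = true := by
        simp only [List.all_eq_true]
        intro b hb
        simp only [Bool.not_eq_true']
        by_contra hcon
        exact h ⟨b, hb, by simpa using hcon⟩
      simp [h1, h2]
  | cons x xs ih =>
    intro buckets
    simp only [pvDfs, List.foldl_cons]
    have hstep : pvStep [buckets] x = pvExpand x [] buckets := by
      simp [pvStep]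
    rw [hstep, pvFoldl_step_flatMap, List.filter_flatMap]
    exact List.flatMap_congr (fun st _ => (ih st).symm ▸ rfl)

theorem pvFilter_foldl (xs : List Int) (S : List (List (List Int))) :
    (xs.foldl pvStep S).filter (fun st => st.all (fun b => !b.isEmpty)) =
      S.flatMap (fun st => pvDfs st xs) := by
  rw [pvFoldl_step_flatMap, List.filter_flatMap]
  exact List.flatMap_congr (fun st _ => (pvDfs_eq_foldl xs st).symm)

theorem pvExpand_mem (x : Int) :
    ∀ (rest pre : List (List Int)) (st' : List (List Int)), st' ∈ pvExpand x pre rest →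
      st'.length = pre.length + rest.length ∧
      st'.countP (fun b => !b.isEmpty) ≤
        pre.countP (fun b => !b.isEmpty) + rest.countP (fun b => !b.isEmpty) + 1 := by
  intro rest
  induction rest with
  | nil => intro pre st' h; simp [pvExpand] at h
  | cons b bs ih =>
    intro pre st' h
    have hne : (b ++ [x]).isEmpty = false := by simp
    have h' : st' = pre ++ (b ++ [x]) :: bs ∨ st' ∈ pvExpand x (pre ++ [b]) bs := by
      by_cases hb : b.length = 0
      · left; simpa [pvExpand, hb] using h
      · simpa [pvExpand, hb] using h
    rcases h' with h' | h'
    · subst h'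
      refine ⟨by simp only [List.length_append, List.length_cons], ?_⟩
      simp only [List.countP_append, List.countP_cons, hne]
      split_ifs <;> omega
    · obtain ⟨h1, h2⟩ := ih (pre ++ [b]) st' h'
      refine ⟨by simp only [List.length_append, List.length_cons, List.length_nil] at h1 ⊢; omega, ?_⟩
      simp only [List.countP_append, List.countP_cons, List.countP_nil] at h2 ⊢
      split_ifs at h2 ⊢ <;> omega

theorem pvDfs_dead (k : Int) :
    ∀ (l : List Int) (st : List (List Int)), st.length = k.toNat →
      (st.countP (fun b => !b.isEmpty) : Int) + l.length < k → pvDfs st l = [] := by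
  intro l
  induction l with
  | nil =>
    intro st hlen hc
    simp only [pvDfs]
    by_cases h : st.any (fun a => a.length == 0)
    · simp [h]
    · exfalso
      have hall : ∀ a ∈ st, ¬(a.length == 0) = true :=
        List.any_eq_false.mp (Bool.eq_false_iff.mpr h)
      have hcp : st.countP (fun b => !b.isEmpty) = st.length := by
        rw [List.countP_eq_length]
        intro a ha
        have h0 := hall a ha
        cases a with
        | nil => simp at h0
        | cons c cs => simp
      simp only [List.length_nil] at hc
      omega
  | cons y ys ih =>
    intro st hlen hc
    simp only [pvDfs]
    rw [List.flatMap_eq_nil_iff]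
    intro st' hst'
    obtain ⟨h1, h2⟩ := pvExpand_mem y st [] st' hst'
    simp only [List.length_nil, Nat.zero_add] at h1
    simp only [List.countP_nil, Nat.zero_add] at h2
    refine ih st' (by omega) ?_
    simp only [List.length_cons] at hc
    push_cast at hc ⊢
    omega

theorem pvFlatMap_filter {α β : Type} (p : α → Bool) (f : α → List β) :
    ∀ (l : List α), (∀ a ∈ l, p a = false → f a = []) →
      (l.filter p).flatMap f = l.flatMap f := by
  intro l
  induction l with
  | nil => intro _; rfl
  | cons a as ih =>
    intro h
    cases hpa : p a with
    | true => simp [hpa, ih (fun b hb hpb => h b (List.mem_cons_of_mem _ hb) hpb)]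
    | false =>
      simp [hpa, ih (fun b hb hpb => h b (List.mem_cons_of_mem _ hb) hpb),
        h a (List.mem_cons_self) hpa]

theorem pvStep_mem_length (k : Int) (x : Int) (sts : List (List (List Int)))
    (hlen : ∀ st ∈ sts, st.length = k.toNat) :
    ∀ st' ∈ pvStep sts x, st'.length = k.toNat := by
  intro st' h
  obtain ⟨st, hst, hmem⟩ := List.mem_flatMap.mp h
  have := (pvExpand_mem x st [] st' hmem).1
  simp only [List.length_nil, Nat.zero_add] at this
  rw [this, hlen st hst]

theorem pvPrune (k : Int) :
    ∀ (l : List Int) (sts : List (List (List Int))),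
      (∀ st ∈ sts, st.length = k.toNat) →
      ((l.foldl (pvStepP k) (sts, l.length)).1).filter (fun st => st.all (fun b => !b.isEmpty))
        = (l.foldl pvStep sts).filter (fun st => st.all (fun b => !b.isEmpty)) := by
  intro l
  induction l with
  | nil => intro sts _; rfl
  | cons x xs ih =>
    intro sts hlen
    have hr : (x :: xs).length - 1 = xs.length := by simp
    simp only [List.foldl_cons, pvStepP, hr]
    have hmem : ∀ st' ∈ pvStep sts x, st'.length = k.toNat := pvStep_mem_length k x sts hlen
    rw [ih _ (fun st' h => hmem st' (List.mem_filter.mp h).1)]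
    rw [pvFilter_foldl, pvFilter_foldl]
    apply pvFlatMap_filter
    intro st' h hpv
    apply pvDfs_dead k xs st' (hmem st' h)
    have : ¬ (k ≤ (st'.countP (fun b => !b.isEmpty) : Int) + xs.length) := by
      simpa [pvViable] using hpv
    omega

theorem pvFoldl_append_nil (l : List Int) :
    ∀ acc : List (List Int),
      l.foldl (fun acc _ => acc ++ [([] : List Int)]) acc = acc ++ List.replicate l.length [] := by
  induction l with
  | nil => intro acc; simp
  | cons x xs ih =>
    intro acc
    rw [List.foldl_cons, ih, List.length_cons, List.replicate_succ]
    simp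

theorem pvPath_eq_replicate (k : Int) :
    (PySem.List.pyRange 0 k 1).foldl (fun acc _ => acc ++ [([] : List Int)]) [] =
      List.replicate k.toNat [] := by
  rw [pvFoldl_append_nil]
  simp [PySem.List.length_pyRange_one]

-- ===== VERDICT (by name: the statement is the Claim_ definition above) =====
theorem print_k_sub_set_spec : Claim_equal_print_k_sub_set := by
  intro input_arr k _
  unfold Spec_print_k_sub_set print_k_sub_set print_k_sub_set_alt
  simp only [pvPath_eq_replicate]
  rw [pvPartArr_eq_pvDfs _ _ 0 _ (by omega), List.drop_zero]
  rw [pvPrune k _ [List.replicate k.toNat []]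
    (by intro st h; rw [List.mem_singleton] at h; rw [h, List.length_replicate])]
  rw [pvFilter_foldl]
  simp
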